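-- pv_equiv track=rewrite | github.com/xboikev/Python_course | basic.py | c_of_all_vowels
-- ===== SOURCE A (Python) =====
-- def c_of_all_vowels(w1,w2,w3):
--     c_vowels = {}
--     vowels = ('a', 'e', 'i', 'o', 'u', 'y')
--     for key in vowels:
--         counted_vowels = w1.count(key) + w2.count(key) + w3.count(key)
--         if counted_vowels > 0:
--             c_vowels[key] = counted_vowels
--     return c_vowels
-- ===== SOURCE B (Python) =====
-- def c_of_all_vowels(w1, w2, w3):
--     vowels = 'aeiouy'
--     freq = {}
--     for ch in w1 + w2 + w3:
--         if ch in vowels: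
--             freq[ch] = freq.get(ch, 0) + 1
--     return {v: freq[v] for v in vowels if v in freq}
-- ===== Notes on version B (the rewrite author's own statement) =====
-- stated objective: idiomatic
-- what changed: B makes one frequency-table pass over the characters of the three words (instead of A's per-vowel .count scans of each word) and then restricts the table to the vowels with positive count.
import Mathlib
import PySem

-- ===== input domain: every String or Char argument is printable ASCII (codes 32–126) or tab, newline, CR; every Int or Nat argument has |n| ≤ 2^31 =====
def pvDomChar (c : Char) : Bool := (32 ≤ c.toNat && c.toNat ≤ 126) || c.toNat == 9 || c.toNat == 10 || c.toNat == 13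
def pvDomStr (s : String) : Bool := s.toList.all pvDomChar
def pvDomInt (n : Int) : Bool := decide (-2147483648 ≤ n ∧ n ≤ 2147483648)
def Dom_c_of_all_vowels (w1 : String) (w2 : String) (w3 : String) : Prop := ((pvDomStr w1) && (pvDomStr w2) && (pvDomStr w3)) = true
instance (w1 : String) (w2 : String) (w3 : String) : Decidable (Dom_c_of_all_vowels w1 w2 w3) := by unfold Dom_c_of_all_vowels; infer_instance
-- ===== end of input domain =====

-- B replaces A's per-vowel .count scans by one frequency-table pass over the characters (idiomatic; same result, same key order).

-- ===== PORT A =====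
def c_of_all_vowels (w1 : String) (w2 : String) (w3 : String) : List (String × Int) :=
  let vowels : List String := ["a", "e", "i", "o", "u", "y"]
  let c_vowels : PySem.Dict String Int :=
    vowels.foldl (fun d key =>
      let counted_vowels : Int :=
        (PySem.Str.count w1 key : Int) + (PySem.Str.count w2 key : Int) + (PySem.Str.count w3 key : Int)
      if counted_vowels > 0 then d.insert key counted_vowels else d)
      PySem.Dict.empty
  c_vowels.items

-- ===== PORT B =====
def c_of_all_vowels_alt (w1 : String) (w2 : String) (w3 : String) : List (String × Int) :=
  let vowels : List Char := "aeiouy".toList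
  let freq : PySem.Dict Char Int :=
    (w1.toList ++ w2.toList ++ w3.toList).foldl
      (fun d ch => if ch ∈ vowels then d.insert ch (d.getD ch 0 + 1) else d)
      PySem.Dict.empty
  (vowels.filter (fun v => freq.contains v)).map (fun v => (String.ofList [v], freq.getD v 0))

-- ===== PRECONDITION & SPEC =====
def Spec_c_of_all_vowels (w1 : String) (w2 : String) (w3 : String) (out : List (String × Int)) : Prop := out = c_of_all_vowels_alt w1 w2 w3
instance (w1 : String) (w2 : String) (w3 : String) (out : List (String × Int)) : Decidable (Spec_c_of_all_vowels w1 w2 w3 out) := by unfold Spec_c_of_all_vowels; infer_instance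

-- ===== CLAIM (what is proved, stated in full; the proofs are below) =====
def Claim_equal_c_of_all_vowels : Prop := ∀ (w1 : String) (w2 : String) (w3 : String), Dom_c_of_all_vowels w1 w2 w3 → Spec_c_of_all_vowels w1 w2 w3 (c_of_all_vowels w1 w2 w3)

-- ===== LEMMAS AND PROOFS =====

-- Python s.count(c) for a single character c is the plain character count.
theorem chars_count_go_singleton (c : Char) :
    ∀ (fuel : Nat) (l : List Char) (acc : Nat), l.length ≤ fuel →
      PySem.Chars.count.go [c] fuel l acc = acc + l.count c := by
  intro fuel
  induction fuel with
  | zero => intro l acc h; cases l with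
    | nil => simp [PySem.Chars.count.go]
    | cons x t => simp at h
  | succ n ih =>
    intro l acc h
    cases l with
    | nil => simp [PySem.Chars.count.go]
    | cons x t =>
      have ht : t.length ≤ n := by simp only [List.length_cons] at h; omega
      by_cases hx : c = x
      · subst hx
        simp only [PySem.Chars.count.go]
        rw [if_pos (by simp [List.isPrefixOf])]
        rw [show List.drop [c].length (c :: t) = t from rfl]
        rw [ih t (acc + 1) ht]
        simp
        omega
      · simp only [PySem.Chars.count.go]
        rw [if_neg (by simp [List.isPrefixOf]; exact hx)]
        rw [ih t acc ht]
        simp [Ne.symm hx]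

theorem str_count_singleton (w : String) (c : Char) :
    PySem.Str.count w (String.ofList [c]) = w.toList.count c := by
  rw [PySem.Str.count_eq]
  rw [show (String.ofList [c]).toList = [c] by simp]
  simp only [PySem.Chars.count]
  rw [if_neg (by simp)]
  simpa using chars_count_go_singleton c w.toList.length w.toList 0 le_rfl


-- A's loop: items of a fold of guarded inserts over distinct fresh keys = the filtered key/value list.
theorem itemsFoldGuardedInsert (cnt : String → Int) :
    ∀ (vs : List String) (d : PySem.Dict String Int),
      vs.Nodup → (∀ v ∈ vs, d.contains v = false) →
      (vs.foldl (fun d key => if cnt key > 0 then d.insert key (cnt key) else d) d).items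
        = d.items ++ (vs.filter (fun v => decide (cnt v > 0))).map (fun v => (v, cnt v)) := by
  intro vs
  induction vs with
  | nil => intro d _ _; simp
  | cons v vs ih =>
    intro d hnd hfresh
    have hv : d.contains v = false := hfresh v (by simp)
    rw [List.nodup_cons] at hnd
    simp only [List.foldl_cons]
    by_cases h : cnt v > 0
    · rw [if_pos h]
      rw [ih (d.insert v (cnt v)) hnd.2 ?fresh]
      · rw [PySem.Dict.items_insert_of_not_contains d (cnt v) hv]
        simp [h]
      case fresh =>
        intro u hu
        rw [PySem.Dict.contains_insert]
        have hne : ¬ u = v := fun he => hnd.1 (he ▸ hu)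
        simp [hne, hfresh u (by simp [hu])]
    · rw [if_neg h]
      rw [ih d hnd.2 (fun u hu => hfresh u (by simp [hu]))]
      simp [h]

-- ===== VERDICT (by name: the statement is the Claim_ definition above) =====
theorem c_of_all_vowels_spec : Claim_equal_c_of_all_vowels := by
  intro w1 w2 w3 _
  show c_of_all_vowels w1 w2 w3 = c_of_all_vowels_alt w1 w2 w3
  simp only [c_of_all_vowels, c_of_all_vowels_alt]
  -- names
  set cs : List Char := w1.toList ++ w2.toList ++ w3.toList with hcs
  set vl : List Char := "aeiouy".toList with hvl
  set cnt : String → Int := fun key =>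
    (PySem.Str.count w1 key : Int) + (PySem.Str.count w2 key : Int) + (PySem.Str.count w3 key : Int) with hcnt
  set f : Char → String := fun c => String.ofList [c] with hf
  -- A side
  rw [itemsFoldGuardedInsert cnt ["a", "e", "i", "o", "u", "y"] PySem.Dict.empty (by decide)
      (fun v _ => PySem.Dict.contains_empty v)]
  rw [show (["a", "e", "i", "o", "u", "y"] : List String) = vl.map f from by rw [hvl, hf]; rfl]
  rw [List.filter_map, List.map_map]
  -- B side: the guarded count loop is Counter over the vowel characters of cs
  rw [show (fun (d : PySem.Dict Char Int) ch => if ch ∈ vl then d.insert ch (d.getD ch 0 + 1) else d)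
        = (fun d ch => if (fun c => decide (c ∈ vl)) ch = true then d.insert ch (d.getD ch 0 + 1) else d) from by
      funext d ch; by_cases h : ch ∈ vl <;> simp [h]]
  rw [← List.foldl_filter, PySem.Dict.foldl_insert_getD_add_one_eq_counter]
  set fcs : List Char := cs.filter (fun c => decide (c ∈ vl)) with hfcs
  -- per-vowel facts
  have hcount : ∀ v : Char, cnt (f v) = ((cs.count v : Nat) : Int) := by
    intro v
    rw [hcnt, hf]
    simp only [str_count_singleton, hcs, List.count_append]
    push_cast
    ring
  have hfilter_count : ∀ v ∈ vl, fcs.count v = cs.count v := by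
    intro v hv
    rw [hfcs]
    exact List.count_filter (by simpa using hv)
  have hfilter_mem : ∀ v ∈ vl, fcs.contains v = cs.contains v := by
    intro v hv
    simp [hfcs, List.mem_filter, hv]
  -- predicates agree
  rw [List.filter_congr (q := fun v => (PySem.Dict.counter fcs).contains v)
      (l := vl) ?hpred]
  case hpred =>
    intro v hv
    simp only [Function.comp_apply, PySem.Dict.contains_counter, hfilter_mem v hv, hcount v]
    simp
  -- values agree on the filtered list
  refine List.map_congr_left ?_
  intro v hv
  have hvv : v ∈ vl := (List.mem_filter.mp hv).1
  simp only [Function.comp_apply, PySem.Dict.getD_counter, hfilter_count v hvv, hcount v]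
  rw [hf]
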